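-- pv_equiv track=rewrite | github.com/ahlawrence/fourfold_amino_acid_aligned | fourfold_samelength_any.py | find_matching_positions
-- ===== SOURCE A (Python) =====
-- def find_matching_positions(sequences):
--     patterns = ["CT", "GT", "TC", "CC", "AC", "GC", "CG", "GG"]
--     min_length = min(len(s) for s in sequences)
--     matching_positions = []
--
--     for i in range(0, min_length - 2, 3):
--         segments = [s[i:i+2] for s in sequences]
--         if all(segment in patterns for segment in segments):
--             matching_positions.append(i)
--
--     return matching_positions
-- ===== SOURCE B (Python) =====
-- def find_matching_positions(sequences):
--     patterns = {"CT", "GT", "TC", "CC", "AC", "GC", "CG", "GG"}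
--     position_sets = [
--         {i for i in range(0, len(s) - 2, 3) if s[i:i+2] in patterns}
--         for s in sequences
--     ]
--     return sorted(set.intersection(*position_sets))
-- ===== Notes on version B (the rewrite author's own statement) =====
-- stated objective: alternative
-- what changed: B builds, per sequence, the set of codon positions whose leading dinucleotide is fourfold-degenerate, intersects these sets across all sequences, and returns the sorted intersection, instead of A's single loop over range(0, min_length-2, 3) testing all sequences at each position.
import Mathlib
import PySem

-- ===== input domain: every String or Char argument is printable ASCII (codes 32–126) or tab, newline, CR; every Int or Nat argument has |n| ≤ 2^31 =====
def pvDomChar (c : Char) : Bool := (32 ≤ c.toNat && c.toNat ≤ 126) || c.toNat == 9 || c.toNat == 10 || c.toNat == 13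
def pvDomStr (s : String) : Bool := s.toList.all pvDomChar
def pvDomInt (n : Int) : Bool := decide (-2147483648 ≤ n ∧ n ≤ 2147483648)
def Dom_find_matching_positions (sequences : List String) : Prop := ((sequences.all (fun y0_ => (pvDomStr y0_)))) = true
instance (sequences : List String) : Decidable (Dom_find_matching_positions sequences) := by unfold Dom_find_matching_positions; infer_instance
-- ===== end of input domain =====

-- B re-implements A as: per-sequence sets of valid codon positions, intersected across
-- sequences, then sorted — same values, a different decomposition (objective: alternative).

-- ===== PORT A =====
def fmpPatterns : List String := ["CT", "GT", "TC", "CC", "AC", "GC", "CG", "GG"]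

def find_matching_positions (sequences : List String) : List Int :=
  match PySem.List.min? (sequences.map (fun s => (PySem.Str.len s : Int))) (fun x => x) with
  | none => []   -- unreachable under Pre_: min() of an empty generator raises ValueError
  | some min_length =>
      (PySem.List.pyRange 0 (min_length - 2) 3).foldl
        (fun acc i =>
          -- segments = [s[i:i+2] for s in sequences], inlined at its single use
          if (sequences.map (fun s => PySem.Str.slice s (some i) (some (i + 2)))).all
              (fun seg => fmpPatterns.contains seg) then acc ++ [i] else acc)
        []

-- ===== PORT B =====
def fmpPosSet (s : String) : PySem.Set Int :=
  PySem.Set.ofList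
    ((PySem.List.pyRange 0 ((PySem.Str.len s : Int) - 2) 3).filter
      (fun i => fmpPatterns.contains (PySem.Str.slice s (some i) (some (i + 2)))))

def find_matching_positions_alt (sequences : List String) : List Int :=
  match sequences.map fmpPosSet with
  | [] => []   -- unreachable under Pre_: set.intersection(*[]) raises TypeError
  | s0 :: rest =>
      PySem.List.sorted (rest.foldl PySem.Set.inter s0) (fun x => x) false

-- ===== PRECONDITION & SPEC =====
-- Pre_ excludes only the empty list, on which both Pythons raise (ValueError / TypeError).
def Pre_find_matching_positions (sequences : List String) : Prop := sequences ≠ []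
instance (sequences : List String) : Decidable (Pre_find_matching_positions sequences) := by
  unfold Pre_find_matching_positions; infer_instance

def pvWitness_find_matching_positions : List String := ["CTATTG", "GTCGTA"]

def Spec_find_matching_positions (sequences : List String) (out : List Int) : Prop := out = find_matching_positions_alt sequences
instance (sequences : List String) (out : List Int) : Decidable (Spec_find_matching_positions sequences out) := by unfold Spec_find_matching_positions; infer_instance

-- ===== CLAIM (what is proved, stated in full; the proofs are below) =====
def Claim_equal_find_matching_positions : Prop := ∀ (sequences : List String), Dom_find_matching_positions sequences → Pre_find_matching_positions sequences → Spec_find_matching_positions sequences (find_matching_positions sequences)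

-- ===== LEMMAS AND PROOFS =====

-- x is in the fold of intersections iff it is in the accumulator and in every listed set
theorem fmp_mem_foldl_inter (l : List (PySem.Set Int)) (acc : PySem.Set Int) (x : Int) :
    x ∈ l.foldl PySem.Set.inter acc ↔ x ∈ acc ∧ ∀ s ∈ l, x ∈ s := by
  induction l generalizing acc with
  | nil => simp
  | cons h t ih =>
      simp only [List.foldl_cons, ih, PySem.Set.mem_inter, List.mem_cons]
      constructor
      · rintro ⟨⟨hx, hh⟩, ht⟩
        exact ⟨hx, fun s hs => hs.elim (fun e => e ▸ hh) (ht s)⟩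
      · rintro ⟨hx, hall⟩
        exact ⟨⟨hx, hall h (Or.inl rfl)⟩, fun s hs => hall s (Or.inr hs)⟩

theorem fmp_nodup_foldl_inter (l : List (PySem.Set Int)) (acc : PySem.Set Int)
    (h : acc.Nodup) : (l.foldl PySem.Set.inter acc).Nodup := by
  induction l generalizing acc with
  | nil => exact h
  | cons s t ih => exact ih _ (PySem.Set.nodup_inter _ _ h)

theorem fmp_pairwise_pyRange3 (b : Int) :
    (PySem.List.pyRange 0 b 3).Pairwise (· < ·) := by
  rw [PySem.List.pyRange_of_pos 0 b (by norm_num)]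
  refine List.Pairwise.map _ (fun a b h => ?_) List.pairwise_lt_range
  omega

theorem fmp_mem_posSet (s : String) (x : Int) :
    x ∈ fmpPosSet s ↔ (0 ≤ x ∧ x < (PySem.Str.len s : Int) - 2 ∧ (3 : Int) ∣ x) ∧
      fmpPatterns.contains (PySem.Str.slice s (some x) (some (x + 2))) = true := by
  unfold fmpPosSet
  rw [PySem.Set.mem_ofList, List.mem_filter,
    PySem.List.mem_pyRange_iff_of_pos (by norm_num : (0:Int) < 3)]
  simp only [sub_zero]

-- ===== VERDICT (by name: the statement is the Claim_ definition above) =====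
theorem find_matching_positions_spec : Claim_equal_find_matching_positions := by
  unfold Claim_equal_find_matching_positions
  intro sequences _ hpre
  unfold Spec_find_matching_positions
  obtain ⟨s0, rest, rfl⟩ : ∃ s0 rest, sequences = s0 :: rest := by
    cases sequences with
    | nil => exact absurd rfl hpre
    | cons a l => exact ⟨a, l, rfl⟩
  rcases hmin : PySem.List.min? ((s0 :: rest).map (fun s => (PySem.Str.len s : Int))) (fun x => x)
      with _ | m
  · rw [List.map_cons, PySem.List.min?_id_cons] at hmin
    cases hmin
  have hm_mem : m ∈ (s0 :: rest).map (fun s => (PySem.Str.len s : Int)) :=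
    PySem.List.min?_mem hmin
  have hm_min : ∀ s ∈ s0 :: rest, m ≤ (PySem.Str.len s : Int) := by
    intro s hs
    exact PySem.List.min?_isMin hmin _ (List.mem_map_of_mem hs)
  -- unfold the two ports
  unfold find_matching_positions find_matching_positions_alt
  rw [hmin]
  simp only [List.map_cons]
  show List.foldl
      (fun acc i =>
        if (PySem.Str.slice s0 (some i) (some (i + 2)) ::
              rest.map (fun s => PySem.Str.slice s (some i) (some (i + 2)))).all
            (fun seg => fmpPatterns.contains seg) then acc ++ [i] else acc)
      [] (PySem.List.pyRange 0 (m - 2) 3) =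
    PySem.List.sorted ((rest.map fmpPosSet).foldl PySem.Set.inter (fmpPosSet s0)) (fun x => x)
  rw [PySem.List.foldl_append_if_eq_filter]
  rw [List.nil_append]
  -- name the filter predicate of A's loop
  set pA : Int → Bool := fun i =>
    (PySem.Str.slice s0 (some i) (some (i + 2)) ::
        rest.map (fun s => PySem.Str.slice s (some i) (some (i + 2)))).all
      (fun seg => fmpPatterns.contains seg) with hpA
  refine (PySem.List.sorted_eq_of_perm_of_pairwise_lt _ _ _ ?_ ?_).symm
  · -- permutation via nodup + same membership
    refine (List.perm_ext_iff_of_nodup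
      (((fmp_pairwise_pyRange3 (m - 2)).filter pA).imp (fun h => ne_of_lt h))
      (fmp_nodup_foldl_inter _ _ (PySem.Set.nodup_ofList _))).mpr ?_
    intro x
    rw [List.mem_filter, PySem.List.mem_pyRange_iff_of_pos (by norm_num : (0:Int) < 3),
      fmp_mem_foldl_inter]
    simp only [← fmpPosSet.eq_def]
    have hR : (x ∈ fmpPosSet s0 ∧ ∀ t ∈ rest.map fmpPosSet, x ∈ t) ↔
        ∀ s ∈ s0 :: rest, x ∈ fmpPosSet s := by
      simp
    rw [hR]
    have hL : pA x = true ↔ ∀ s ∈ s0 :: rest,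
        fmpPatterns.contains (PySem.Str.slice s (some x) (some (x + 2))) = true := by
      simp [hpA]
    rw [hL]
    simp only [fmp_mem_posSet, sub_zero]
    constructor
    · rintro ⟨⟨hx0, hxm, hdvd⟩, hall⟩ s hs
      exact ⟨⟨hx0, lt_of_lt_of_le hxm (by have h2 := hm_min s hs; omega), hdvd⟩, hall s hs⟩
    · intro hall
      obtain ⟨sm, hsm, hsmlen⟩ := List.mem_map.mp hm_mem
      have hsm2 := (hall sm hsm).1.2.1
      refine ⟨⟨(hall s0 (List.mem_cons_self ..)).1.1, by omega,
        (hall s0 (List.mem_cons_self ..)).1.2.2⟩, fun s hs => (hall s hs).2⟩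
  · exact (fmp_pairwise_pyRange3 (m - 2)).filter pA
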